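-- pv_equiv track=rewrite | github.com/Ren-97/CodePath2025Summer | Unit3/section1_advanced1.py | arrange_guest_arrival_order
-- ===== SOURCE A (Python) =====
-- def arrange_guest_arrival_order(arrival_pattern):
--     n = len(arrival_pattern)
--     stack = []
--     res = []
--
--     for i in range(n + 1):
--         stack.append(str(i + 1))
--         if i == n or arrival_pattern[i] == "I":
--             while stack:
--                 res.append(stack.pop())
--     return "".join(res)
-- ===== SOURCE B (Python) =====
-- def arrange_guest_arrival_order(arrival_pattern):
--     n = len(arrival_pattern)
--     res = []
--     i = 0
--     while i <= n:
--         j = i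
--         while j < n and arrival_pattern[j] != "I":
--             j += 1
--         res.extend(reversed([str(x) for x in range(i + 1, j + 2)]))
--         i = j + 1
--     return "".join(res)
-- ===== Notes on version B (the rewrite author's own statement) =====
-- stated objective: alternative
-- what changed: Replaces the push/pop stack with a direct scan that finds each maximal run of decrease characters and emits that decreasing segment at once (an ascending range reversed), no stack maintained.
import Mathlib
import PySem

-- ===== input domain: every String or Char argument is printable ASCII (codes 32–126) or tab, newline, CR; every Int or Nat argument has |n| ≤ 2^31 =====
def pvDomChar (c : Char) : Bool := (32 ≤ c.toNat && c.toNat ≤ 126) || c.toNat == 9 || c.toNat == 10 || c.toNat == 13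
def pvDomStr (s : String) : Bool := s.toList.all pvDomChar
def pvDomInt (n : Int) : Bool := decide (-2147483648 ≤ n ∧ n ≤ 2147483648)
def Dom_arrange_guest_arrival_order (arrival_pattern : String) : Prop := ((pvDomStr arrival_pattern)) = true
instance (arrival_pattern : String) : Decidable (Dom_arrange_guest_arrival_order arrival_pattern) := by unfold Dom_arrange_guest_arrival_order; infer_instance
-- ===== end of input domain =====

-- B replaces A's push/pop stack with a direct scan that finds each maximal run of
-- decrease characters and emits that decreasing segment at once (alternative, same cost).

-- ===== PORT A =====
-- 'while stack: res.append(stack.pop())' — pop from the end, one element per step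
def pvPopAll (stack res : List String) : List String × List String :=
  if stack = [] then (stack, res)
  else pvPopAll stack.dropLast (res ++ [stack.getLast!])
termination_by stack.length
decreasing_by
  have := List.length_pos_of_ne_nil (by assumption : stack ≠ [])
  simp [List.length_dropLast]; omega

-- 'for i in range(n + 1): …' as recursion on the index i (0 ≤ i ≤ n)
def pvALoop (s : String) (n i : Nat) (stack res : List String) : List String :=
  if i ≤ n then
    let stack1 := stack ++ [PySem.Int.toStr (↑i + 1)]
    if i = n ∨ PySem.Str.pyGet? s ↑i = some 'I' then
      let p := pvPopAll stack1 res
      pvALoop s n (i + 1) p.1 p.2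
    else
      pvALoop s n (i + 1) stack1 res
  else res
termination_by n + 1 - i

def arrange_guest_arrival_order (arrival_pattern : String) : String :=
  let n := arrival_pattern.toList.length
  PySem.Str.join "" (pvALoop arrival_pattern n 0 [] [])

-- ===== PORT B =====
-- inner 'while j < n and arrival_pattern[j] != "I": j += 1'
def pvRunEnd (s : String) (n j : Nat) : Nat :=
  if j < n ∧ PySem.Str.pyGet? s ↑j ≠ some 'I' then pvRunEnd s n (j + 1) else j
termination_by n - j

-- needed for pvBLoop's termination
theorem le_pvRunEnd (s : String) (n j : Nat) : j ≤ pvRunEnd s n j := by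
  induction j using pvRunEnd.induct s n with
  | case1 j h ih => rw [pvRunEnd, if_pos h]; omega
  | case2 j h => rw [pvRunEnd, if_neg h]

-- 'reversed([str(x) for x in range(i + 1, j + 2)])' (before the reverse)
def pvStrs (i j : Nat) : List String :=
  (PySem.List.pyRange (↑i + 1) (↑j + 2) 1).map PySem.Int.toStr

-- outer 'while i <= n: …'
def pvBLoop (s : String) (n i : Nat) (res : List String) : List String :=
  if i ≤ n then
    let j := pvRunEnd s n i
    pvBLoop s n (j + 1) (res ++ (pvStrs i j).reverse)
  else res
termination_by n + 1 - i
decreasing_by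
  have := le_pvRunEnd s n i
  omega

def arrange_guest_arrival_order_alt (arrival_pattern : String) : String :=
  let n := arrival_pattern.toList.length
  PySem.Str.join "" (pvBLoop arrival_pattern n 0 [])

-- ===== PRECONDITION & SPEC =====
def Spec_arrange_guest_arrival_order (arrival_pattern : String) (out : String) : Prop := out = arrange_guest_arrival_order_alt arrival_pattern
instance (arrival_pattern : String) (out : String) : Decidable (Spec_arrange_guest_arrival_order arrival_pattern out) := by unfold Spec_arrange_guest_arrival_order; infer_instance

-- ===== CLAIM (what is proved, stated in full; the proofs are below) =====
def Claim_equal_arrange_guest_arrival_order : Prop := ∀ (arrival_pattern : String), Dom_arrange_guest_arrival_order arrival_pattern → Spec_arrange_guest_arrival_order arrival_pattern (arrange_guest_arrival_order arrival_pattern)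

-- ===== LEMMAS AND PROOFS =====

theorem pvGetLastBang_concat (xs : List String) (x : String) : (xs ++ [x]).getLast! = x := by
  cases xs with
  | nil => rfl
  | cons a as =>
      simp only [List.getLast!, List.cons_append]
      exact List.getLast_concat (l := a :: as) (a := x)

theorem pvPopAll_eq (st res : List String) : pvPopAll st res = ([], res ++ st.reverse) := by
  induction st using List.reverseRecOn generalizing res with
  | nil => rw [pvPopAll]; simp
  | append_singleton xs x ih =>
      rw [pvPopAll, if_neg (by simp)]
      simp only [List.dropLast_concat]
      rw [ih, pvGetLastBang_concat]
      simp

theorem pvRunEnd_stop (s : String) (n j : Nat) (h : ¬ (j < n ∧ PySem.Str.pyGet? s ↑j ≠ some 'I')) :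
    pvRunEnd s n j = j := by rw [pvRunEnd, if_neg h]

theorem pvRunEnd_step (s : String) (n j : Nat) (h : j < n ∧ PySem.Str.pyGet? s ↑j ≠ some 'I') :
    pvRunEnd s n j = pvRunEnd s n (j + 1) := by rw [pvRunEnd, if_pos h]

theorem pvStrs_cons (i j : Nat) (h : i ≤ j) :
    pvStrs i j = PySem.Int.toStr (↑i + 1) :: pvStrs (i + 1) j := by
  unfold pvStrs
  rw [PySem.List.pyRange_one_cons (by omega)]
  simp only [List.map_cons]
  have h2 : ((i : Int) + 1) + 1 = ((i + 1 : Nat) : Int) + 1 := by push_cast [Nat.cast_add]; ring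
  rw [h2]

theorem pvStrs_single (i : Nat) : pvStrs i i = [PySem.Int.toStr (↑i + 1)] := by
  unfold pvStrs
  have : (↑i + 2 : Int) = (↑i + 1) + 1 := by ring
  rw [this, PySem.List.pyRange_one_singleton]
  rfl

-- A flushes exactly at the end of each maximal decrease run
theorem pvALoop_seg (s : String) (n : Nat) :
    ∀ k i st res, n - i ≤ k → i ≤ n →
      pvALoop s n i st res =
        pvALoop s n (pvRunEnd s n i + 1) [] (res ++ (st ++ pvStrs i (pvRunEnd s n i)).reverse) := by
  intro k
  induction k with
  | zero =>
      intro i st res hk hi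
      have hin : i = n := by omega
      have hstop : pvRunEnd s n i = i := pvRunEnd_stop s n i (by rintro ⟨h1, h2⟩; omega)
      rw [pvALoop, if_pos hi, if_pos (Or.inl hin)]
      rw [hstop, pvStrs_single]
      simp [pvPopAll_eq]
  | succ k ih =>
      intro i st res hk hi
      by_cases hc : i = n ∨ PySem.Str.pyGet? s ↑i = some 'I'
      · have hstop : pvRunEnd s n i = i := pvRunEnd_stop s n i (fun hcon => hcon.2 (hc.resolve_left (Nat.ne_of_lt hcon.1)))
        rw [pvALoop, if_pos hi, if_pos hc]
        rw [hstop, pvStrs_single]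
        simp [pvPopAll_eq]
      · rw [not_or] at hc
        have hlt : i < n := by omega
        have hne : PySem.Str.pyGet? s ↑i ≠ some 'I' := hc.2
        have hstep : pvRunEnd s n i = pvRunEnd s n (i + 1) := pvRunEnd_step s n i ⟨hlt, hne⟩
        rw [pvALoop, if_pos hi, if_neg (fun h => h.elim hc.1 hc.2)]
        rw [ih (i + 1) (st ++ [PySem.Int.toStr (↑i + 1)]) res (by omega) (by omega)]
        rw [hstep]
        have hij : i + 1 ≤ pvRunEnd s n (i + 1) := le_pvRunEnd s n (i + 1)
        rw [pvStrs_cons i (pvRunEnd s n (i + 1)) (by omega)]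
        simp

theorem pvMain (s : String) (n : Nat) :
    ∀ k i res, n + 1 - i ≤ k → pvALoop s n i [] res = pvBLoop s n i res := by
  intro k
  induction k with
  | zero =>
      intro i res hk
      have : ¬ i ≤ n := by omega
      rw [pvALoop, if_neg this, pvBLoop, if_neg this]
  | succ k ih =>
      intro i res hk
      by_cases hi : i ≤ n
      · rw [pvALoop_seg s n (n - i) i [] res (by omega) hi]
        rw [pvBLoop, if_pos hi]
        simp only [List.nil_append]
        have hij : i ≤ pvRunEnd s n i := le_pvRunEnd s n i
        exact ih (pvRunEnd s n i + 1) _ (by omega)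
      · rw [pvALoop, if_neg hi, pvBLoop, if_neg hi]

-- ===== VERDICT (by name: the statement is the Claim_ definition above) =====
theorem arrange_guest_arrival_order_spec : Claim_equal_arrange_guest_arrival_order := by
  intro s _
  unfold Spec_arrange_guest_arrival_order arrange_guest_arrival_order arrange_guest_arrival_order_alt
  exact congrArg (PySem.Str.join "") (pvMain s s.toList.length (s.toList.length + 1) 0 [] (by omega))
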